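-- pv_equiv track=rewrite | github.com/nusgnojkrap/pythonJong | s1005_1.py | calculate
-- ===== SOURCE A (Python) =====
-- def calculate(path, timedb, goal):
--     new = 0
--     s = 0
--     if len(path) == 0:
--         return timedb[int(goal) -1]
--     for i in range(0, len(path)):
--         new = new + int(timedb[int(path[i]) - 1])
--         if i+1 == len(path) or path[i+1] == goal:
--             if s <= new:
--                 s = new
--             new = 0
--     return s
-- ===== SOURCE B (Python) =====
-- def calculate(path, timedb, goal):
--     # recursive divide-and-conquer: peel off the first segment (path[0] plus
--     # elements up to the next occurrence of goal), recurse on the remainder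
--     if not path:
--         return timedb[int(goal) - 1]
--     head, tail = [path[0]], path[1:]
--     while tail and tail[0] != goal:
--         head.append(tail[0])
--         tail = tail[1:]
--     seg = sum(int(timedb[int(p) - 1]) for p in head)
--     if not tail:
--         return max(0, seg)
--     return max(seg, calculate(tail, timedb, goal))
-- ===== Notes on version B (the rewrite author's own statement) =====
-- stated objective: alternative
-- what changed: Replaces A's single indexed loop with a running maximum by a recursive divide-and-conquer: split off the first segment (up to the next occurrence of goal), sum it, and take the max with a recursive call on the remaining suffix.
import Mathlib
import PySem

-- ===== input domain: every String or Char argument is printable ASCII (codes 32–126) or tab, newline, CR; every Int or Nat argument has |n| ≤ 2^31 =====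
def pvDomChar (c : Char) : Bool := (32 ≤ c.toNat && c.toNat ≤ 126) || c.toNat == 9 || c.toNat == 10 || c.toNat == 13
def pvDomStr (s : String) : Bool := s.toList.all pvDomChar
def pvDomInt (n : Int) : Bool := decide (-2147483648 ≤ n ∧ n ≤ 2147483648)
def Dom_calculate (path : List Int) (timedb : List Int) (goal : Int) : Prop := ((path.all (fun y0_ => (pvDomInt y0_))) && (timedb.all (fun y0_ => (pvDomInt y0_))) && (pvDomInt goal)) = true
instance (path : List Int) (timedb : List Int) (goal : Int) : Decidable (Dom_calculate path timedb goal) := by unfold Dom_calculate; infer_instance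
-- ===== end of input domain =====

-- B replaces A's indexed loop with a running maximum by a recursive divide-and-conquer
-- that peels off one segment (up to the next goal occurrence) per call; same cost.

-- ===== PORT A =====
def stepA (path : List Int) (timedb : List Int) (goal : Int) (st : Int × Int) (i : Nat) : Int × Int :=
  let new := st.1 + (PySem.List.pyGet? timedb ((PySem.List.pyGet? path (i : Int)).getD 0 - 1)).getD 0
  if i + 1 = path.length ∨ (PySem.List.pyGet? path ((i : Int) + 1)).getD 0 = goal then
    (0, if st.2 ≤ new then new else st.2)
  else (new, st.2)

def calculate (path : List Int) (timedb : List Int) (goal : Int) : Int :=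
  if path.length = 0 then (PySem.List.pyGet? timedb (goal - 1)).getD 0
  else ((List.range path.length).foldl (stepA path timedb goal) (0, 0)).2

-- ===== PORT B =====
def calculate_alt (path : List Int) (timedb : List Int) (goal : Int) : Int :=
  match path with
  | [] => (PySem.List.pyGet? timedb (goal - 1)).getD 0
  | p :: rest =>
    let head := p :: rest.takeWhile (fun x => x != goal)
    let tail := rest.dropWhile (fun x => x != goal)
    let seg := (head.map (fun q => (PySem.List.pyGet? timedb (q - 1)).getD 0)).sum
    if tail.isEmpty then max 0 seg else max seg (calculate_alt tail timedb goal)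
termination_by path.length
decreasing_by
  simp only [List.length_cons]
  exact Nat.lt_succ_of_le (List.length_dropWhile_le _ _)

-- ===== PRECONDITION & SPEC =====
-- Pre_ excludes exactly the inputs where Python A raises IndexError: the lookup
-- timedb[goal-1] (empty path) or timedb[p-1] (each p on the path) out of range.
def Pre_calculate (path : List Int) (timedb : List Int) (goal : Int) : Prop :=
  if path = [] then PySem.Raise.InRange timedb.length (goal - 1)
  else ∀ p ∈ path, PySem.Raise.InRange timedb.length (p - 1)

instance (path : List Int) (timedb : List Int) (goal : Int) : Decidable (Pre_calculate path timedb goal) := by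
  unfold Pre_calculate; infer_instance

def pvWitness_calculate : List Int × List Int × Int := ([1, 2, 1], [3, -4], 1)

def Spec_calculate (path : List Int) (timedb : List Int) (goal : Int) (out : Int) : Prop := out = calculate_alt path timedb goal
instance (path : List Int) (timedb : List Int) (goal : Int) (out : Int) : Decidable (Spec_calculate path timedb goal out) := by unfold Spec_calculate; infer_instance

-- ===== CLAIM (what is proved, stated in full; the proofs are below) =====
def Claim_equal_calculate : Prop := ∀ (path : List Int) (timedb : List Int) (goal : Int), Dom_calculate path timedb goal → Pre_calculate path timedb goal → Spec_calculate path timedb goal (calculate path timedb goal)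

-- ===== LEMMAS AND PROOFS =====

/-- the contribution int(timedb[x-1]) of a path element, as the ports compute it -/
def segVal (timedb : List Int) (x : Int) : Int := (PySem.List.pyGet? timedb (x - 1)).getD 0

/-- structural form of A's loop over the remaining path, state (new, s) -/
def loopA (timedb : List Int) (goal : Int) : List Int → Int → Int → Int
  | [], _, s => s
  | [p], new, s =>
    if s ≤ new + segVal timedb p then new + segVal timedb p else s
  | p :: q :: rest, new, s =>
    if q = goal then
      loopA timedb goal (q :: rest) 0 (if s ≤ new + segVal timedb p then new + segVal timedb p else s)
    else loopA timedb goal (q :: rest) (new + segVal timedb p) s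

theorem stepA_shift (p : Int) (rest timedb : List Int) (goal : Int) (st : Int × Int) (i : Nat) :
    stepA (p :: rest) timedb goal st (i + 1) = stepA rest timedb goal st i := by
  have e1 : PySem.List.pyGet? (p :: rest) ((i + 1 : Nat) : Int) = rest[i]? := by
    rw [PySem.List.pyGet?_natCast]; simp
  have e2 : PySem.List.pyGet? (p :: rest) (((i + 1 : Nat) : Int) + 1) = rest[i + 1]? := by
    rw [show (((i + 1 : Nat) : Int) + 1) = ((i + 2 : Nat) : Int) from by push_cast; ring,
      PySem.List.pyGet?_natCast]
    simp
  have e3 : PySem.List.pyGet? rest ((i : Nat) : Int) = rest[i]? := by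
    rw [PySem.List.pyGet?_natCast]
  have e4 : PySem.List.pyGet? rest (((i : Nat) : Int) + 1) = rest[i + 1]? := by
    rw [show (((i : Nat) : Int) + 1) = ((i + 1 : Nat) : Int) from by push_cast; ring,
      PySem.List.pyGet?_natCast]
  have hc : (i + 1 + 1 = (p :: rest).length) ↔ (i + 1 = rest.length) := by
    simp
  simp only [stepA, e1, e2, e3, e4, hc]

theorem foldA_eq (timedb : List Int) (goal : Int) :
    ∀ (path : List Int), path ≠ [] → ∀ (new s : Int),
      ((List.range path.length).foldl (stepA path timedb goal) (new, s)).2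
        = loopA timedb goal path new s := by
  intro path
  induction path with
  | nil => intro h; exact absurd rfl h
  | cons p rest ih =>
    intro _ new s
    rw [List.length_cons, List.range_succ_eq_map, List.foldl_cons, List.foldl_map]
    have hstep : ∀ (st : Int × Int) (i : Nat),
        stepA (p :: rest) timedb goal st (i + 1) = stepA rest timedb goal st i :=
      fun st i => stepA_shift p rest timedb goal st i
    simp only [Nat.succ_eq_add_one, hstep]
    cases rest with
    | nil =>
      simp [stepA, loopA, segVal]
    | cons q rest' =>
      show (List.foldl (stepA (q :: rest') timedb goal)
          (stepA (p :: q :: rest') timedb goal (new, s) 0)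
          (List.range (q :: rest').length)).2 = loopA timedb goal (p :: q :: rest') new s
      have h1 : PySem.List.pyGet? (p :: q :: rest') ((0 : Int) + 1) = some q := by
        rw [show ((0 : Int) + 1) = ((1 : Nat) : Int) from by norm_num, PySem.List.pyGet?_natCast]
        rfl
      have hfirst : stepA (p :: q :: rest') timedb goal (new, s) 0 =
          (if q = goal then
            ((0 : Int), if s ≤ new + segVal timedb p then new + segVal timedb p else s)
          else (new + segVal timedb p, s)) := by
        simp only [stepA, segVal, Nat.cast_zero, PySem.List.pyGet?_zero,
          List.getElem?_cons_zero, Option.getD_some, h1, List.length_cons]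
        have hc2 : (0 + 1 = rest'.length + 1 + 1 ∨ q = goal) ↔ (q = goal) := by
          constructor
          · rintro (h | h)
            · omega
            · exact h
          · exact Or.inr
        simp only [hc2]
      rw [hfirst]
      by_cases hq : q = goal
      · rw [if_pos hq, ih (by simp)]
        simp only [loopA]
        rw [if_pos hq]
      · rw [if_neg hq, ih (by simp)]
        simp only [loopA]
        rw [if_neg hq]

/-- A's loop, unrolled through the first segment: accumulate until the next goal
    occurrence (or the end), then fold the segment total into the maximum. -/
theorem loopA_split (timedb : List Int) (goal : Int) :
    ∀ (rest : List Int) (p : Int) (new s : Int),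
      loopA timedb goal (p :: rest) new s =
        (let seg := new + segVal timedb p
            + ((rest.takeWhile (fun x => x != goal)).map (segVal timedb)).sum
         match rest.dropWhile (fun x => x != goal) with
         | [] => max s seg
         | t :: ts => loopA timedb goal (t :: ts) 0 (max s seg)) := by
  intro rest
  induction rest with
  | nil =>
    intro p new s
    simp [loopA, max_def]
  | cons q rest' ih =>
    intro p new s
    by_cases hq : q = goal
    · show (if q = goal then _ else _) = _
      rw [if_pos hq]
      have hd : (q :: rest').dropWhile (fun x => x != goal) = q :: rest' := by
        rw [List.dropWhile_cons_of_neg]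
        simp [hq]
      have ht : (q :: rest').takeWhile (fun x => x != goal) = [] := by
        rw [List.takeWhile_cons_of_neg]
        simp [hq]
      simp only [hd, ht, List.map_nil, List.sum_nil, add_zero, max_def]
    · show (if q = goal then _ else _) = _
      rw [if_neg hq]
      have hd : (q :: rest').dropWhile (fun x => x != goal)
          = rest'.dropWhile (fun x => x != goal) := by
        rw [List.dropWhile_cons_of_pos]
        simp [hq]
      have ht : (q :: rest').takeWhile (fun x => x != goal)
          = q :: rest'.takeWhile (fun x => x != goal) := by
        rw [List.takeWhile_cons_of_pos]
        simp [hq]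
      rw [ih q (new + segVal timedb p) s]
      simp only [hd, ht, List.map_cons, List.sum_cons]
      have : new + segVal timedb p + (segVal timedb q
          + ((rest'.takeWhile (fun x => x != goal)).map (segVal timedb)).sum)
          = new + segVal timedb p + segVal timedb q
          + ((rest'.takeWhile (fun x => x != goal)).map (segVal timedb)).sum := by ring
      rw [this]

/-- the central invariant: A's loop from running maximum s ≥ 0 is s joined with
    B's recursive segment maximum. -/
theorem key (timedb : List Int) (goal : Int) :
    ∀ (n : Nat) (path : List Int), path.length ≤ n → path ≠ [] → ∀ (s : Int), 0 ≤ s →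
      loopA timedb goal path 0 s = max s (calculate_alt path timedb goal) := by
  intro n
  induction n with
  | zero =>
    intro path hlen hne
    cases path with
    | nil => exact absurd rfl hne
    | cons p rest => simp at hlen
  | succ n ih =>
    intro path hlen hne s hs
    cases path with
    | nil => exact absurd rfl hne
    | cons p rest =>
      rw [loopA_split timedb goal rest p 0 s]
      rw [calculate_alt]
      simp only [zero_add]
      set seg := segVal timedb p
          + ((rest.takeWhile (fun x => x != goal)).map (segVal timedb)).sum with hseg
      have hsegB : ((p :: rest.takeWhile (fun x => x != goal)).map
          (fun q => (PySem.List.pyGet? timedb (q - 1)).getD 0)).sum = seg := by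
        simp only [List.map_cons, List.sum_cons, hseg, segVal]
        rfl
      cases hdrop : rest.dropWhile (fun x => x != goal) with
      | nil =>
        rw [if_pos (by simp), hsegB]
        rw [show max s seg = max s (max 0 seg) from by
          rw [← max_assoc, max_eq_left hs]]
      | cons t ts =>
        rw [if_neg (by simp), hsegB]
        have hlen' : (t :: ts).length ≤ n := by
          have hle := List.length_dropWhile_le (fun x => x != goal) rest
          rw [hdrop] at hle
          simp only [List.length_cons] at hle hlen ⊢
          omega
        show loopA timedb goal (t :: ts) 0 (max s seg)
            = max s (max seg (calculate_alt (t :: ts) timedb goal))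
        rw [ih (t :: ts) hlen' (by simp) (max s seg) (le_trans hs (le_max_left s seg))]
        rw [max_assoc]

/-- B's result is never negative: the base case carries the 0 floor upward. -/
theorem alt_nonneg (timedb : List Int) (goal : Int) :
    ∀ (n : Nat) (path : List Int), path.length ≤ n → path ≠ [] →
      0 ≤ calculate_alt path timedb goal := by
  intro n
  induction n with
  | zero =>
    intro path hlen hne
    cases path with
    | nil => exact absurd rfl hne
    | cons p rest => simp at hlen
  | succ n ih =>
    intro path hlen hne
    cases path with
    | nil => exact absurd rfl hne
    | cons p rest =>
      rw [calculate_alt]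
      cases hdrop : rest.dropWhile (fun x => x != goal) with
      | nil =>
        rw [if_pos (by simp)]
        exact le_max_left 0 _
      | cons t ts =>
        rw [if_neg (by simp)]
        have hlen' : (t :: ts).length ≤ n := by
          have hle := List.length_dropWhile_le (fun x => x != goal) rest
          rw [hdrop] at hle
          simp only [List.length_cons] at hle hlen ⊢
          omega
        exact le_trans (ih (t :: ts) hlen' (by simp)) (le_max_right _ _)

-- ===== VERDICT (by name: the statement is the Claim_ definition above) =====
theorem calculate_spec : Claim_equal_calculate := by
  intro path timedb goal _ _
  unfold Spec_calculate
  cases path with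
  | nil => simp [calculate, calculate_alt]
  | cons p rest =>
    rw [calculate, if_neg (by simp)]
    rw [foldA_eq timedb goal (p :: rest) (by simp) 0 0]
    rw [key timedb goal (p :: rest).length (p :: rest) le_rfl (by simp) 0 le_rfl]
    exact max_eq_right (alt_nonneg timedb goal (p :: rest).length (p :: rest) le_rfl (by simp))
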